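-- pv_equiv track=rewrite | github.com/KotisKotlyandii/lessons1 | ege22/50.py | f
-- ===== SOURCE A (Python) =====
-- def f(x):
--     a,b = 0,0
--     while x > 0:
--         c = x % 2
--         if c == 0:
--             a += 1
--         else:
--             b += 1
--         x //= 10
--     return '%d\n%d' % (a,b)
-- ===== SOURCE B (Python) =====
-- def f(x):
--     if x <= 0:
--         return '0\n0'
--     a = b = 0
--     for ch in str(x):
--         if ch in ('0', '2', '4', '6', '8'):
--             a += 1
--         else:
--             b += 1
--     return '%d\n%d' % (a, b)
-- ===== Notes on version B (the rewrite author's own statement) =====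
-- stated objective: idiomatic
-- what changed: B counts even/odd decimal digits by scanning the characters of str(x) left-to-right instead of peeling digits arithmetically with %2 and //=10, with an explicit x<=0 guard for the empty loop case.
import Mathlib
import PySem

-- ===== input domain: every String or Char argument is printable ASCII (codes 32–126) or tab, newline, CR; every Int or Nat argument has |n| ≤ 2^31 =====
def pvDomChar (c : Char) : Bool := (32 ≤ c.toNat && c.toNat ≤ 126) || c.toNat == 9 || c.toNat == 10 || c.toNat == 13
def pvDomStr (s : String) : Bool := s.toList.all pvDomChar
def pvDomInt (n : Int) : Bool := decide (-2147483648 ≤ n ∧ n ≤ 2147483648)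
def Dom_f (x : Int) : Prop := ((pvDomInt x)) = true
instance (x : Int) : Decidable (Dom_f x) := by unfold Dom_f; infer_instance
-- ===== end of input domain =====

-- B counts even/odd decimal digits by scanning the characters of str(x) instead of
-- peeling digits arithmetically with %2 and //=10 (objective: more idiomatic; same cost).

-- ===== PORT A =====
-- the while loop of A, state (x, a, b)
def fGo (x a b : Int) : String :=
  if _h : 0 < x then
    let c := PySem.Int.mod x 2
    if c = 0 then fGo (PySem.Int.floordiv x 10) (a + 1) b
    else fGo (PySem.Int.floordiv x 10) a (b + 1)
  else
    PySem.Int.toStr a ++ "\n" ++ PySem.Int.toStr b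
termination_by x.toNat
decreasing_by
  all_goals
    rw [PySem.Int.floordiv_eq_ediv_of_pos (by omega : (0:Int) < 10)]; omega

def f (x : Int) : String := fGo x 0 0

-- ===== PORT B =====
-- B's loop body: 'if ch in ('0','2','4','6','8'): a += 1 else: b += 1'
def altStep (p : Int × Int) (ch : Char) : Int × Int :=
  if ch ∈ ['0', '2', '4', '6', '8'] then (p.1 + 1, p.2) else (p.1, p.2 + 1)

def f_alt (x : Int) : String :=
  if x ≤ 0 then "0\n0"
  else
    let p := (PySem.Int.toStr x).toList.foldl altStep (0, 0)
    PySem.Int.toStr p.1 ++ "\n" ++ PySem.Int.toStr p.2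

-- ===== PRECONDITION & SPEC =====
def Spec_f (x : Int) (out : String) : Prop := out = f_alt x
instance (x : Int) (out : String) : Decidable (Spec_f x out) := by unfold Spec_f; infer_instance

-- ===== CLAIM (what is proved, stated in full; the proofs are below) =====
def Claim_equal_f : Prop := ∀ (x : Int), Dom_f x → Spec_f x (f x)

-- ===== LEMMAS AND PROOFS =====

-- predicate "the char is an even decimal digit", as tested by B
def pe (ch : Char) : Bool := decide (ch ∈ ['0', '2', '4', '6', '8'])

-- reference count of (even, odd) decimal digits of n, peeling from the right like A
def digCnt (n : Nat) : Nat × Nat :=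
  if _h : n = 0 then (0, 0)
  else
    let r := digCnt (n / 10)
    if n % 2 = 0 then (r.1 + 1, r.2) else (r.1, r.2 + 1)
decreasing_by omega

-- the digit-char list produced by Nat.toDigitsCore, without fuel
def dlist (n : Nat) : List Char :=
  if _h : n / 10 = 0 then [Nat.digitChar (n % 10)]
  else dlist (n / 10) ++ [Nat.digitChar (n % 10)]
decreasing_by omega

lemma toDigitsCore_eq_dlist (f : Nat) :
    ∀ (n : Nat) (ds : List Char), n < f →
      Nat.toDigitsCore 10 f n ds = dlist n ++ ds := by
  induction f with
  | zero => intro n ds h; omega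
  | succ f ih =>
    intro n ds h
    rw [Nat.toDigitsCore]
    by_cases h10 : n / 10 = 0
    · simp [h10, dlist]
    · rw [if_neg h10, ih (n / 10) _ (by omega)]
      conv_rhs => rw [dlist, dif_neg h10]
      rw [List.append_assoc]
      rfl

lemma toDigits_eq_dlist (n : Nat) : Nat.toDigits 10 n = dlist n := by
  have := toDigitsCore_eq_dlist (n + 1) n [] (by omega)
  simpa [Nat.toDigits] using this

-- B's parity test on a digit char agrees with A's parity test on the number
lemma pe_digitChar (n : Nat) :
    pe (Nat.digitChar (n % 10)) = decide (n % 2 = 0) := by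
  have h2 : n % 2 = n % 10 % 2 := by omega
  rw [h2]
  have h10 : n % 10 < 10 := Nat.mod_lt _ (by omega)
  interval_cases (n % 10) <;> decide

-- counting over dlist equals the arithmetic digit count (n > 0)
lemma countP_dlist (n : Nat) (hn : 0 < n) :
    (dlist n).countP pe = (digCnt n).1 ∧
    (dlist n).countP (fun c => !pe c) = (digCnt n).2 := by
  rw [dlist, digCnt, dif_neg (by omega : ¬ n = 0)]
  have hpe := pe_digitChar n
  by_cases h10 : n / 10 = 0
  · have h0 : digCnt (n / 10) = (0, 0) := by rw [h10, digCnt]; simp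
    rw [dif_pos h10, h0]
    by_cases hp : n % 2 = 0 <;> simp [hpe, hp]
  · have ih := countP_dlist (n / 10) (by omega)
    rw [dif_neg h10]
    by_cases hp : n % 2 = 0 <;>
      simp [List.countP_append, hpe, hp, ih.1, ih.2]
decreasing_by omega

-- B's fold accumulates exactly the two countP's
lemma foldl_altStep (l : List Char) :
    ∀ (a b : Int), l.foldl altStep (a, b) =
      (a + (l.countP pe : Nat), b + (l.countP (fun c => !pe c) : Nat)) := by
  induction l with
  | nil => intro a b; simp
  | cons c l ih =>
    intro a b
    by_cases hc : c ∈ ['0', '2', '4', '6', '8']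
    · have hpe : pe c = true := by simpa [pe] using hc
      simp only [List.foldl_cons, altStep, if_pos hc, ih, List.countP_cons, hpe]
      simp
      omega
    · have hpe : pe c = false := by simpa [pe] using hc
      simp only [List.foldl_cons, altStep, if_neg hc, ih, List.countP_cons, hpe]
      simp
      omega

-- A's loop computes the arithmetic digit counts
lemma fGo_eq (m : Nat) :
    ∀ (a b : Int), fGo (m : Int) a b =
      PySem.Int.toStr (a + ((digCnt m).1 : Nat)) ++ "\n" ++
      PySem.Int.toStr (b + ((digCnt m).2 : Nat)) := by
  by_cases hm : m = 0
  · intro a b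
    subst hm
    rw [fGo, digCnt]
    simp
  · intro a b
    have ih := fGo_eq (m / 10)
    rw [fGo, dif_pos (by exact_mod_cast Nat.pos_of_ne_zero hm)]
    have hmod : PySem.Int.mod (m : Int) 2 = ((m % 2 : Nat) : Int) :=
      PySem.Int.mod_natCast m 2
    have hdiv : PySem.Int.floordiv (m : Int) 10 = ((m / 10 : Nat) : Int) :=
      PySem.Int.floordiv_natCast m 10
    rw [digCnt, dif_neg hm]
    by_cases hp : m % 2 = 0
    · rw [if_pos (by rw [hmod, hp]; rfl), hdiv, ih, if_pos hp]
      push_cast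
      ring_nf
    · rw [if_neg (by rw [hmod]; exact_mod_cast hp), hdiv, ih, if_neg hp]
      push_cast
      ring_nf
termination_by m
decreasing_by omega

-- ===== VERDICT (by name: the statement is the Claim_ definition above) =====
theorem f_spec : Claim_equal_f := by
  intro x _
  show f x = f_alt x
  by_cases hx : x ≤ 0
  · unfold f f_alt fGo
    rw [dif_neg (by omega), if_pos hx]
    decide
  · -- x > 0: let m be the Nat value of x
    have hx' : 0 < x := by omega
    obtain ⟨m, rfl⟩ : ∃ m : Nat, x = (m : Int) :=
      ⟨x.toNat, (Int.toNat_of_nonneg (by omega)).symm⟩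
    have hm : 0 < m := by exact_mod_cast hx'
    unfold f f_alt
    rw [if_neg hx]
    have hchars : (PySem.Int.toStr (m : Int)).toList = dlist m := by
      rw [PySem.Int.toList_toStr, PySem.Int.toChars,
        if_neg (by omega : ¬ (m : Int) < 0)]
      simpa using toDigits_eq_dlist m
    rw [fGo_eq m 0 0, hchars, foldl_altStep]
    have hc := countP_dlist m hm
    rw [hc.1, hc.2]
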